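-- pv_equiv track=rewrite | github.com/Mattbusel/Every-Other-Token | every_other_token.py | mock_transform
-- ===== SOURCE A (Python) =====
-- def mock_transform(token: str, index: int) -> str:
--     """Mock every odd token (alternating case)"""
--     if index % 2 == 0:
--         return token  # Even: normal
--     else:
--         # Create mocking text (alternating case)
--         result = ""
--         for i, char in enumerate(token):
--             if i % 2 == 0:
--                 result += char.lower()
--             else:
--                 result += char.upper()
--         return result
-- ===== SOURCE B (Python) =====
-- def mock_transform(token: str, index: int) -> str:
--     """Mock every odd token (alternating case)"""
--     if index % 2 == 0:
--         return token
--     # build two-character pieces: lower the first, upper the second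
--     pieces = []
--     i = 0
--     while i + 1 < len(token):
--         pieces.append(token[i].lower() + token[i + 1].upper())
--         i += 2
--     pieces.append(token[i:].lower())
--     return "".join(pieces)
-- ===== Notes on version B (the rewrite author's own statement) =====
-- stated objective: alternative
-- what changed: Replaces the per-character indexed loop with an i%2 parity test by a two-characters-at-a-time pairing loop (lower the first of each pair, upper the second, lowercase the leftover tail) joined at the end, removing the parity bookkeeping.
import Mathlib
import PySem

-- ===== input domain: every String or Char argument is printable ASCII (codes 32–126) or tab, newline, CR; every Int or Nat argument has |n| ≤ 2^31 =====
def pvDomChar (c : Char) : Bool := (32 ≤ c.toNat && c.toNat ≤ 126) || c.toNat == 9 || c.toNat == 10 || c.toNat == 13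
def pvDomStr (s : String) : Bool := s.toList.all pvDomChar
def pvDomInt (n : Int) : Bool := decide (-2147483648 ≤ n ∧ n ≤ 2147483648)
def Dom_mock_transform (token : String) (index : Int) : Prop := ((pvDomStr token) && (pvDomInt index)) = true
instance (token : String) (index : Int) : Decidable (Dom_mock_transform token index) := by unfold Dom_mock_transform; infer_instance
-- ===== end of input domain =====

-- B replaces A's per-character indexed parity loop by a two-characters-at-a-time pairing loop (alternative decomposition).

-- ===== PORT A =====
-- the loop body: result += char.lower() / char.upper() according to i % 2
def pvStepA (result : String) (p : Int × Char) : String :=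
  if PySem.Int.mod p.1 2 == 0 then result ++ String.singleton (PySem.Chars.lowerChar p.2)
  else result ++ String.singleton (PySem.Chars.upperChar p.2)

def mock_transform (token : String) (index : Int) : String :=
  if PySem.Int.mod index 2 == 0 then token
  else (PySem.List.enumerate token.toList 0).foldl pvStepA ""

-- ===== PORT B =====
-- Source B's while loop: while i+1 < len, emit token[i].lower() + token[i+1].upper(), step i by 2;
-- afterwards append token[i:].lower(); the join is the concatenation of the emitted pieces
def pvMockGo (cs : List Char) (i : Nat) : List Char :=
  if h : i + 1 < cs.length then
    PySem.Chars.lowerChar (cs[i]'(by omega)) :: PySem.Chars.upperChar (cs[i + 1]'h) :: pvMockGo cs (i + 2)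
  else
    PySem.Chars.lower (cs.drop i)
termination_by cs.length - i

def mock_transform_alt (token : String) (index : Int) : String :=
  if PySem.Int.mod index 2 == 0 then token
  else String.ofList (pvMockGo token.toList 0)

-- ===== PRECONDITION & SPEC =====
def Spec_mock_transform (token : String) (index : Int) (out : String) : Prop := out = mock_transform_alt token index
instance (token : String) (index : Int) (out : String) : Decidable (Spec_mock_transform token index out) := by unfold Spec_mock_transform; infer_instance

-- ===== CLAIM (what is proved, stated in full; the proofs are below) =====
def Claim_equal_mock_transform : Prop := ∀ (token : String) (index : Int), Dom_mock_transform token index → Spec_mock_transform token index (mock_transform token index)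

-- ===== LEMMAS AND PROOFS =====

-- proof-only structural (cons-pattern) form of the pairing loop
def pvPairs : List Char → List Char
  | c1 :: c2 :: rest => PySem.Chars.lowerChar c1 :: PySem.Chars.upperChar c2 :: pvPairs rest
  | s => PySem.Chars.lower s

theorem pvPairs_nil : pvPairs [] = [] := by simp [pvPairs, PySem.Chars.lower]

theorem pvPairs_single (c : Char) : pvPairs [c] = [PySem.Chars.lowerChar c] := by
  simp [pvPairs, PySem.Chars.lower]

-- the index loop computes the structural pairing of the remaining suffix
theorem pvMockGo_eq_pairs (cs : List Char) (i : Nat) : pvMockGo cs i = pvPairs (cs.drop i) := by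
  unfold pvMockGo
  split
  · next h =>
    rw [pvMockGo_eq_pairs cs (i + 2)]
    rw [List.drop_eq_getElem_cons (by omega : i < cs.length),
        List.drop_eq_getElem_cons (h : i + 1 < cs.length)]
    simp [pvPairs]
  · next h =>
    have hlen : (cs.drop i).length ≤ 1 := by simp; omega
    match hd : cs.drop i with
    | [] => simp [pvPairs_nil, PySem.Chars.lower]
    | [c] => simp [pvPairs_single, PySem.Chars.lower]
    | a :: b :: t => rw [hd] at hlen; simp at hlen
termination_by cs.length - i

-- loop invariant: from an even start index, A's fold appends exactly pvPairs of the remaining chars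
theorem pvKey (xs : List Char) (s : Int) (acc : String)
    (hs : 2 ∣ s) :
    List.foldl pvStepA acc (PySem.List.enumerate xs s) = acc ++ String.ofList (pvPairs xs) := by
  match xs with
  | [] => simp [PySem.List.enumerate_nil, pvPairs_nil]
  | [c] =>
    simp [PySem.List.enumerate_cons, PySem.List.enumerate_nil, pvStepA, hs, pvPairs_single,
      String.ext_iff]
  | c1 :: c2 :: rest =>
    have h1 : ¬ (2 ∣ s + 1) := by omega
    have h2 : (2 : Int) ∣ s + 1 + 1 := by omega
    rw [PySem.List.enumerate_cons, PySem.List.enumerate_cons, List.foldl_cons, List.foldl_cons,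
      pvKey rest (s + 1 + 1) _ h2]
    simp [pvStepA, hs, h1, pvPairs, String.ext_iff]
termination_by xs.length

-- ===== VERDICT (by name: the statement is the Claim_ definition above) =====
theorem mock_transform_spec : Claim_equal_mock_transform := by
  intro token index _
  unfold Spec_mock_transform mock_transform mock_transform_alt
  split
  · rfl
  · rw [pvMockGo_eq_pairs token.toList 0, List.drop_zero]
    have := pvKey token.toList 0 "" ⟨0, rfl⟩
    simpa [String.ext_iff] using this
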